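-- pv_equiv track=rewrite | github.com/pypi-data/pypi-mirror-99 | packages/emspring/emspring-0.87.1722.tar.gz/emspring-0.87.1722/spring/segment2d/segment_prep.py | read_coordinate_lines_from_eman_format_and_separate_helices
-- ===== SOURCE A (Python) =====
-- def read_coordinate_lines_from_eman_format_and_separate_helices(box_coord):
--     """
--     >>> lines = ['50\\t50\\t100\\t100\\t-1\\n', '40\\t40\\t100\\t100\\t0\\n']
--     >>> lines += ['30\\t30\\t100\\t100\\t-2\\n', '20\\t20\\t100\\t100\\t-1\\n',]
--     >>> box_coord = lines + ['10\\t10\\t100\\t100\\t-2\\n']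
--     >>> from spring.segment2d.segment import Segment
--     >>> s = Segment()
--     >>> s.read_coordinate_lines_from_eman_format_and_separate_helices(box_coord) #doctest: +NORMALIZE_WHITESPACE
--     ['50\\t50\\t100\\t100\\t-1\\n40\\t40\\t100\\t100\\t0\\n30\\t30\\t100\\t100\\t-2\\n',
--     '20\\t20\\t100\\t100\\t-1\\n10\\t10\\t100\\t100\\t-2\\n']
--     """
--     helixcoord = []
--     helix = ''
--     for each_file_line in box_coord:
--         helix = helix + each_file_line
--         if each_file_line.endswith('-2\n'):
--             helixcoord.append(helix)
--             helix = ''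
--
--     if helixcoord == []:
--         helixcoord.append(helix)
--
--     return helixcoord
-- ===== SOURCE B (Python) =====
-- def read_coordinate_lines_from_eman_format_and_separate_helices(box_coord):
--     # build the complete helices back-to-front: scan the lines in reverse,
--     # starting a new helix at each '-2' marker and prepending other lines onto
--     # the helix currently in front; lines after the last marker are never
--     # collected, and with no marker at all the whole input is the one helix
--     helices = []
--     for line in reversed(box_coord):
--         if line.endswith('-2\n'):
--             helices.insert(0, [line])
--         elif helices:
--             helices[0].insert(0, line)
--     if not helices:
--         return [''.join(box_coord)]
--     return [''.join(h) for h in helices]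
-- ===== Notes on version B (the rewrite author's own statement) =====
-- stated objective: alternative
-- what changed: Replaces A's forward fold that grows a pending helix string and flushes it at each '-2' marker with a reverse scan that starts a new helix group at each marker and prepends other lines onto the front group, joining each group once at the end (lines after the last marker are never collected instead of being flushed-or-kept).
import Mathlib
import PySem

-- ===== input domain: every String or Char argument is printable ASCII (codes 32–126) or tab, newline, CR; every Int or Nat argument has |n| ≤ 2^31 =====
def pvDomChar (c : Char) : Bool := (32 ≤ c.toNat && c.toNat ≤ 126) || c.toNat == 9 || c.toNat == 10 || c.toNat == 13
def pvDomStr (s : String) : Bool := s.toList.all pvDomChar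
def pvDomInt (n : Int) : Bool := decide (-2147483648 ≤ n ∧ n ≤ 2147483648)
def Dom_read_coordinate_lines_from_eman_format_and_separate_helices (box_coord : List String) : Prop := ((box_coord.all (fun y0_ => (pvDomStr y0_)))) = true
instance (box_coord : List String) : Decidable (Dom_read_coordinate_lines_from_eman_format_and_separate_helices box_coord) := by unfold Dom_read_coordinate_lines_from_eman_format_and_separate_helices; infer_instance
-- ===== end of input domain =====

-- B replaces A's accumulator fold with a structural recursion that builds the
-- helix list back-to-front (objective: alternative decomposition, same cost).

-- ===== PORT A =====
-- literal port of A: fold over the lines with state (helixcoord, helix)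
def read_coordinate_lines_from_eman_format_and_separate_helices (box_coord : List String) : List String :=
  let st := box_coord.foldl
    (fun (st : List String × String) each_file_line =>
      let helix := st.2 ++ each_file_line
      if PySem.Str.endswith each_file_line "-2\n" then (st.1 ++ [helix], "")
      else (st.1, helix))
    ([], "")
  if st.1 = [] then st.1 ++ [st.2] else st.1

-- ===== PORT B =====
-- port of Source B: reverse scan; a marker starts a new helix (as a list of lines)
-- in front, other lines are prepended onto the front helix
def pvStep (helices : List (List String)) (line : String) : List (List String) :=
  if PySem.Str.endswith line "-2\n" then [line] :: helices
  else
    match helices with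
    | [] => []
    | h :: hs => (line :: h) :: hs

def read_coordinate_lines_from_eman_format_and_separate_helices_alt (box_coord : List String) : List String :=
  let helices := box_coord.reverse.foldl pvStep []
  if helices = [] then [PySem.Str.join "" box_coord]
  else helices.map (PySem.Str.join "")

-- ===== PRECONDITION & SPEC =====
def Spec_read_coordinate_lines_from_eman_format_and_separate_helices (box_coord : List String) (out : List String) : Prop := out = read_coordinate_lines_from_eman_format_and_separate_helices_alt box_coord
instance (box_coord : List String) (out : List String) : Decidable (Spec_read_coordinate_lines_from_eman_format_and_separate_helices box_coord out) := by unfold Spec_read_coordinate_lines_from_eman_format_and_separate_helices; infer_instance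

-- ===== CLAIM (what is proved, stated in full; the proofs are below) =====
def Claim_equal_read_coordinate_lines_from_eman_format_and_separate_helices : Prop := ∀ (box_coord : List String), Dom_read_coordinate_lines_from_eman_format_and_separate_helices box_coord → Spec_read_coordinate_lines_from_eman_format_and_separate_helices box_coord (read_coordinate_lines_from_eman_format_and_separate_helices box_coord)

-- ===== LEMMAS AND PROOFS =====

-- proof-side characterisation: the list of complete helices, built by structural recursion
def pvCompleteHelices : List String → List String
  | [] => []
  | first :: tl =>
    let rest := pvCompleteHelices tl
    if PySem.Str.endswith first "-2\n" then first :: rest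
    else
      match rest with
      | [] => []
      | x :: xs => (first ++ x) :: xs

-- prepend a pending prefix onto the first helix of a list (empty list stays empty)
def pvPrep (h : String) : List String → List String
  | [] => []
  | x :: xs => (h ++ x) :: xs

theorem pvPrep_empty (gs : List String) : pvPrep "" gs = gs := by
  cases gs <;> simp [pvPrep]

theorem pvPrep_prep (h l : String) (gs : List String) :
    pvPrep h (pvPrep l gs) = pvPrep (h ++ l) gs := by
  cases gs <;> simp [pvPrep, String.append_assoc]

theorem pvCH_marker (l : String) (tl : List String)
    (hm : PySem.Str.endswith l "-2\n" = true) :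
    pvCompleteHelices (l :: tl) = l :: pvCompleteHelices tl := by
  simp only [pvCompleteHelices, hm, if_pos]

theorem pvCH_nonmarker (l : String) (tl : List String)
    (hm : PySem.Str.endswith l "-2\n" = false) :
    pvCompleteHelices (l :: tl) = pvPrep l (pvCompleteHelices tl) := by
  simp only [pvCompleteHelices, hm, Bool.false_eq_true, if_false]
  cases pvCompleteHelices tl <;> rfl

-- second component of A's fold: the pending helix string
def pvRem (h : String) : List String → String
  | [] => h
  | l :: ls => if PySem.Str.endswith l "-2\n" then pvRem "" ls else pvRem (h ++ l) ls

theorem pv_fold_spec (ls : List String) : ∀ (acc : List String) (h : String),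
    ls.foldl
      (fun (st : List String × String) each_file_line =>
        let helix := st.2 ++ each_file_line
        if PySem.Str.endswith each_file_line "-2\n" then (st.1 ++ [helix], "")
        else (st.1, helix))
      (acc, h)
    = (acc ++ pvPrep h (pvCompleteHelices ls), pvRem h ls) := by
  induction ls with
  | nil => intro acc h; simp [pvCompleteHelices, pvPrep, pvRem]
  | cons l tl ih =>
    intro acc h
    by_cases hm : PySem.Str.endswith l "-2\n" = true
    · rw [List.foldl_cons]
      simp only [hm, if_pos]
      rw [ih, pvCH_marker l tl hm, pvRem, if_pos hm, pvPrep_empty]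
      simp [pvPrep, List.append_assoc]
    · rw [List.foldl_cons]
      simp only [hm, if_neg, Bool.false_eq_true, not_false_iff]
      rw [ih, pvCH_nonmarker l tl (by simpa using hm), pvRem,
        if_neg hm, pvPrep_prep]

theorem pv_join_cons (l : String) (ls : List String) :
    PySem.Str.join "" (l :: ls) = l ++ PySem.Str.join "" ls := by
  cases ls with
  | nil => simp [PySem.Str.join, PySem.Chars.join_singleton, PySem.Chars.join_nil]
  | cons b r => simp [PySem.Str.join, PySem.Chars.join_cons_cons]

theorem pv_rem_of_no_marker (ls : List String) (hnil : pvCompleteHelices ls = []) :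
    ∀ h : String, pvRem h ls = h ++ PySem.Str.join "" ls := by
  induction ls with
  | nil => intro h; simp [pvRem, PySem.Str.join, PySem.Chars.join_nil]
  | cons l tl ih =>
    intro h
    by_cases hm : PySem.Str.endswith l "-2\n" = true
    · rw [pvCH_marker l tl hm] at hnil; exact absurd hnil (by simp)
    · have htl : pvCompleteHelices tl = [] := by
        rw [pvCH_nonmarker l tl (by simpa using hm)] at hnil
        cases hc : pvCompleteHelices tl with
        | nil => rfl
        | cons x xs => rw [hc] at hnil; simp [pvPrep] at hnil
      rw [pvRem, if_neg hm, ih htl, pv_join_cons, String.append_assoc]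

theorem pv_join_nil : PySem.Str.join "" ([] : List String) = "" := by
  simp [PySem.Str.join, PySem.Chars.join_nil]

theorem pv_join_singleton (l : String) : PySem.Str.join "" [l] = l := by
  rw [pv_join_cons, pv_join_nil]; simp

theorem pvStep_marker (acc : List (List String)) (l : String)
    (hm : PySem.Str.endswith l "-2\n" = true) : pvStep acc l = [l] :: acc := by
  simp only [pvStep, hm, if_pos]

theorem pvStep_nonmarker_nil (l : String)
    (hm : PySem.Str.endswith l "-2\n" = false) : pvStep [] l = [] := by
  simp only [pvStep, hm, Bool.false_eq_true, if_false]

theorem pvStep_nonmarker_cons (h : List String) (hs : List (List String)) (l : String)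
    (hm : PySem.Str.endswith l "-2\n" = false) : pvStep (h :: hs) l = (l :: h) :: hs := by
  simp only [pvStep, hm, Bool.false_eq_true, if_false]

-- B's reverse fold, read as a foldr, produces exactly the complete helices
theorem pv_foldB_mapjoin (ls : List String) :
    (ls.foldr (fun line acc => pvStep acc line) []).map (PySem.Str.join "")
      = pvCompleteHelices ls := by
  induction ls with
  | nil => rfl
  | cons l tl ih =>
    rw [List.foldr_cons]
    by_cases hm : PySem.Str.endswith l "-2\n" = true
    · rw [pvCH_marker l tl hm, pvStep_marker _ _ hm, List.map_cons, pv_join_singleton, ih]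
    · have hmf : PySem.Str.endswith l "-2\n" = false := by simpa using hm
      rw [pvCH_nonmarker l tl (by simpa using hm)]
      cases hc : tl.foldr (fun line acc => pvStep acc line) [] with
      | nil =>
        have htl : pvCompleteHelices tl = [] := by rw [← ih, hc]; rfl
        rw [pvStep_nonmarker_nil _ hmf, htl]; rfl
      | cons h hs =>
        have htl : pvCompleteHelices tl = PySem.Str.join "" h :: hs.map (PySem.Str.join "") := by
          rw [← ih, hc, List.map_cons]
        rw [pvStep_nonmarker_cons _ _ _ hmf, htl, List.map_cons, pv_join_cons]
        rfl

-- ===== VERDICT (by name: the statement is the Claim_ definition above) =====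
theorem read_coordinate_lines_from_eman_format_and_separate_helices_spec : Claim_equal_read_coordinate_lines_from_eman_format_and_separate_helices := by
  intro box_coord _
  unfold Spec_read_coordinate_lines_from_eman_format_and_separate_helices
  unfold read_coordinate_lines_from_eman_format_and_separate_helices
  unfold read_coordinate_lines_from_eman_format_and_separate_helices_alt
  rw [pv_fold_spec, List.foldl_reverse]
  simp only [List.nil_append, pvPrep_empty]
  by_cases hnil : box_coord.foldr (fun line acc => pvStep acc line) [] = []
  · have h2 : pvCompleteHelices box_coord = [] := by rw [← pv_foldB_mapjoin, hnil]; rfl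
    rw [hnil, h2]
    simp only [List.nil_append]
    rw [pv_rem_of_no_marker box_coord h2 ""]
    simp
  · have h2 : pvCompleteHelices box_coord ≠ [] := by
      rw [← pv_foldB_mapjoin]
      simpa [List.map_eq_nil_iff] using hnil
    rw [if_neg h2, if_neg hnil, pv_foldB_mapjoin]
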